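-- pv_equiv track=rewrite | github.com/LovelyC-kx/globecom20260503 | cloud_removal_v2/run_single_sat.py | _pick_largest_sat
-- ===== SOURCE A (Python) =====
-- def _pick_largest_sat(client_datasets) -> tuple:
--     """Return (plane_idx, sat_idx, size) of the largest Dirichlet slice."""
--     best_p, best_s, best_n = 0, 0, -1
--     for p_i, row in enumerate(client_datasets):
--         for s_i, ds in enumerate(row):
--             n = len(ds)
--             if n > best_n:
--                 best_p, best_s, best_n = p_i, s_i, n
--     return best_p, best_s, best_n
-- ===== SOURCE B (Python) =====
-- def _row_best(row):
--     """(first index of the longest dataset in row, its length), or None for an empty row."""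
--     if not row:
--         return None
--     lengths = [len(ds) for ds in row]
--     m = max(lengths)
--     return lengths.index(m), m
--
--
-- def _pick_largest_sat(client_datasets) -> tuple:
--     """Return (plane_idx, sat_idx, size) of the largest Dirichlet slice."""
--     best = (0, 0, -1)
--     for p_i, rb in enumerate(map(_row_best, client_datasets)):
--         if rb is not None and rb[1] > best[2]:
--             best = (p_i, rb[0], rb[1])
--     return best
-- ===== Notes on version B (the rewrite author's own statement) =====
-- stated objective: alternative
-- what changed: Replaced the single flat nested scan carrying one (plane,sat,size) state with a reduce-of-row-reductions: each row is summarized to (earliest argmax, max length) via max()+list.index(), then a second pass picks the earliest plane whose row maximum strictly beats the running best.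
import Mathlib
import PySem

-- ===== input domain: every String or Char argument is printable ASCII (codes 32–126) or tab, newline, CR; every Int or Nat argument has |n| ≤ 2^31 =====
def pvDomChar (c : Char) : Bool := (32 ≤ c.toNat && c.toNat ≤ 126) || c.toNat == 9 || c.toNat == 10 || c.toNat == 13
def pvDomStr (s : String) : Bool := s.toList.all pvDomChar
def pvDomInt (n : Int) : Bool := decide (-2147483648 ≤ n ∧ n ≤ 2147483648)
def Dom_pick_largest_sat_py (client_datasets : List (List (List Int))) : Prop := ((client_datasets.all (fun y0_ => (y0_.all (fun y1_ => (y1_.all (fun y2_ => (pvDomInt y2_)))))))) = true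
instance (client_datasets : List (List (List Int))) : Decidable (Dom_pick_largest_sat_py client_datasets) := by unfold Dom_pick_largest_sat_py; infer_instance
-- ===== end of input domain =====

-- B replaces A's flat nested scan with a reduce-of-row-reductions (per-row max+index, then a
-- scan over the row summaries); same cost, different decomposition (objective: alternative).

-- ===== PORT A =====
def pick_largest_sat_py (client_datasets : List (List (List Int))) : Int × Int × Int :=
  (PySem.List.enumerate client_datasets 0).foldl
    (fun st pr =>
      (PySem.List.enumerate pr.2 0).foldl
        (fun st2 q =>
          let n : Int := (q.2.length : Int)
          if n > st2.2.2 then (pr.1, q.1, n) else st2) st)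
    (0, 0, -1)

-- ===== PORT B =====
-- Python helper _row_best: None for an empty row, else (lengths.index(max(lengths)), max(lengths))
def pvRowBest (row : List (List Int)) : Option (Int × Int) :=
  if row = [] then none
  else
    match PySem.List.max? (row.map (fun ds => (ds.length : Int))) (fun y => y) with
    | none => none
    | some m =>
      match PySem.List.index? (row.map (fun ds => (ds.length : Int))) m with
      | some k => some ((k : Int), m)
      | none => none

def pick_largest_sat_py_alt (client_datasets : List (List (List Int))) : Int × Int × Int :=
  (PySem.List.enumerate client_datasets 0).foldl
    (fun best pr =>
      match pvRowBest pr.2 with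
      | some (si, n) => if n > best.2.2 then (pr.1, si, n) else best
      | none => best)
    (0, 0, -1)

-- ===== PRECONDITION & SPEC =====
def Spec_pick_largest_sat_py (client_datasets : List (List (List Int))) (out : Int × Int × Int) : Prop := out = pick_largest_sat_py_alt client_datasets
instance (client_datasets : List (List (List Int))) (out : Int × Int × Int) : Decidable (Spec_pick_largest_sat_py client_datasets out) := by unfold Spec_pick_largest_sat_py; infer_instance

-- ===== CLAIM (what is proved, stated in full; the proofs are below) =====
def Claim_equal_pick_largest_sat_py : Prop := ∀ (client_datasets : List (List (List Int))), Dom_pick_largest_sat_py client_datasets → Spec_pick_largest_sat_py client_datasets (pick_largest_sat_py client_datasets)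

-- ===== LEMMAS AND PROOFS =====

-- proof-side row reduction: (first index of the max length, max length)
def pvRowRed : List (List Int) → Option (Nat × Int)
  | [] => none
  | ds :: t =>
    match pvRowRed t with
    | none => some (0, (ds.length : Int))
    | some (k, m) => if m > (ds.length : Int) then some (k + 1, m) else some (0, (ds.length : Int))

lemma pvRowRed_eq_none_iff (t : List (List Int)) : pvRowRed t = none ↔ t = [] := by
  cases t with
  | nil => simp [pvRowRed]
  | cons a b =>
    simp only [pvRowRed]
    cases h : pvRowRed b
    · simp
    · simp only []
      split_ifs <;> simp

lemma pv_foldl_max_assoc (t : List Int) : ∀ a b : Int, t.foldl max (max a b) = max a (t.foldl max b) := by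
  induction t with
  | nil => intro a b; simp
  | cons c tt ih =>
    intro a b
    simp only [List.foldl_cons]
    rw [max_assoc, ih]

lemma pv_max?_id_cons' (x : Int) (t : List Int) :
    PySem.List.max? (x :: t) (fun y => y) =
      some (match PySem.List.max? t (fun y => y) with | none => x | some m => max x m) := by
  cases t with
  | nil =>
    have h : PySem.List.max? ([] : List Int) (fun y => y) = none := by
      exact (PySem.List.max?_eq_none_iff _ _).mpr rfl
    rw [PySem.List.max?_id_cons, h]
    simp
  | cons h tt =>
    rw [PySem.List.max?_id_cons, PySem.List.max?_id_cons]
    simp only [List.foldl_cons]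
    rw [pv_foldl_max_assoc]

-- pvRowBest computes exactly the proof-side reduction
lemma pvRowBest_eq (row : List (List Int)) :
    pvRowBest row = (pvRowRed row).map (fun p => ((p.1 : Int), p.2)) := by
  induction row with
  | nil => simp [pvRowBest, pvRowRed]
  | cons ds t ih =>
    cases ht : pvRowRed t with
    | none =>
      have ht0 : t = [] := (pvRowRed_eq_none_iff t).mp ht
      subst ht0
      simp [pvRowBest, pvRowRed, pv_max?_id_cons',
        (PySem.List.max?_eq_none_iff ([] : List Int) (fun y => y)).mpr rfl]
    | some km =>
      obtain ⟨k, m⟩ := km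
      have hb : pvRowBest t = some ((k : Int), m) := by rw [ih, ht]; rfl
      have htne : t ≠ [] := by
        intro h; subst h; simp [pvRowRed] at ht
      have hLtne : t.map (fun ds => (ds.length : Int)) ≠ [] := by
        simp [htne]
      obtain ⟨m', hmax⟩ : ∃ m', PySem.List.max? (t.map (fun ds => (ds.length : Int))) (fun y => y) = some m' := by
        rcases h : PySem.List.max? (t.map (fun ds => (ds.length : Int))) (fun y => y) with _ | m'
        · exact absurd ((PySem.List.max?_eq_none_iff _ _).mp h) hLtne
        · exact ⟨m', h⟩
      have hm'mem : m' ∈ t.map (fun ds => (ds.length : Int)) := PySem.List.max?_mem hmax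
      obtain ⟨k', hidx⟩ : ∃ k', PySem.List.index? (t.map (fun ds => (ds.length : Int))) m' = some k' := by
        rcases h : PySem.List.index? (t.map (fun ds => (ds.length : Int))) m' with _ | k'
        · exact absurd ((PySem.List.index?_eq_none_iff _ _).mp h) (by simp [hm'mem])
        · exact ⟨k', h⟩
      have hb2 : pvRowBest t = some ((k' : Int), m') := by
        unfold pvRowBest
        rw [if_neg htne, hmax]
        have hidx' := hidx
        rw [PySem.List.index?_eq_idxOf?] at hidx'
        simp [hidx']
      have he : (((k' : Int), m') : Int × Int) = ((k : Int), m) :=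
        Option.some.inj (hb2.symm.trans hb)
      have hkk : k' = k := by
        have h1 : ((k' : Int)) = (k : Int) := congrArg Prod.fst he
        exact_mod_cast h1
      have hmm : m' = m := congrArg Prod.snd he
      have ht' : pvRowRed t = some (k', m') := by rw [hkk, hmm]; exact ht
      unfold pvRowBest
      rw [if_neg (by simp)]
      simp only [List.map_cons]
      rw [pv_max?_id_cons', hmax]
      simp only []
      by_cases hgt : m' > (ds.length : Int)
      · have hne : (ds.length : Int) ≠ m' := by omega
        rw [show max (ds.length : Int) m' = m' by omega]
        rw [PySem.List.index?_cons_of_ne _ hne, hidx]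
        simp only [pvRowRed, ht', if_pos hgt, Option.map_some]
      · rw [show max (ds.length : Int) m' = (ds.length : Int) by omega]
        rw [PySem.List.index?_cons_self]
        simp [pvRowRed, ht', if_neg hgt]

-- A's inner loop over a row, started at offset s, is the row reduction applied to the state
lemma pv_inner_eq (p : Int) (row : List (List Int)) : ∀ (s : Int) (st : Int × Int × Int),
    (PySem.List.enumerate row s).foldl
        (fun st2 q =>
          let n : Int := (q.2.length : Int)
          if n > st2.2.2 then (p, q.1, n) else st2) st
      = match pvRowRed row with
        | none => st
        | some (k, m) => if m > st.2.2 then (p, s + (k : Int), m) else st := by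
  induction row with
  | nil => intro s st; simp [PySem.List.enumerate_nil, pvRowRed]
  | cons ds t ih =>
    intro s st
    rw [PySem.List.enumerate_cons]
    simp only [List.foldl_cons]
    rw [ih]
    cases ht : pvRowRed t with
    | none =>
      simp only [pvRowRed, ht]
      split_ifs <;> simp
    | some km =>
      obtain ⟨k, m⟩ := km
      simp only [pvRowRed, ht]
      split_ifs <;> simp_all [Prod.ext_iff] <;> (try split_ifs) <;>
        (try simp_all) <;> omega

lemma pv_outer (cd : List (List (List Int))) : ∀ (s : Int) (st : Int × Int × Int),
    (PySem.List.enumerate cd s).foldl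
        (fun st pr =>
          (PySem.List.enumerate pr.2 0).foldl
            (fun st2 q =>
              let n : Int := (q.2.length : Int)
              if n > st2.2.2 then (pr.1, q.1, n) else st2) st) st
      = (PySem.List.enumerate cd s).foldl
          (fun best pr =>
            match pvRowBest pr.2 with
            | some (si, n) => if n > best.2.2 then (pr.1, si, n) else best
            | none => best) st := by
  induction cd with
  | nil => intro s st; simp [PySem.List.enumerate_nil]
  | cons row t ih =>
    intro s st
    rw [PySem.List.enumerate_cons]
    simp only [List.foldl_cons]
    rw [pv_inner_eq, pvRowBest_eq, ih]
    congr 1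
    cases h : pvRowRed row with
    | none => simp
    | some km => obtain ⟨k, m⟩ := km; simp

lemma pv_main (client_datasets : List (List (List Int))) :
    pick_largest_sat_py client_datasets = pick_largest_sat_py_alt client_datasets := by
  unfold pick_largest_sat_py pick_largest_sat_py_alt
  exact pv_outer client_datasets 0 (0, 0, -1)

-- ===== VERDICT (by name: the statement is the Claim_ definition above) =====
theorem pick_largest_sat_py_spec : Claim_equal_pick_largest_sat_py := by
  intro cd _
  unfold Spec_pick_largest_sat_py
  exact pv_main cd
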